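-- pv_equiv track=rewrite | github.com/cenalulu/python_euler_solver | 062/solution.py | finger_print
-- ===== SOURCE A (Python) =====
-- def finger_print(number):
--     fp_str = list()
--     digit_profile = {digit: 0 for digit in range(0, 10)}
--     for digit in list(str(number)):
--         digit_profile[int(digit)] += 1
--
--     for digit in range(0, 10):
--         if digit_profile[digit] > 0:
--             fp_str.append(str(digit)+str(digit_profile[digit]))
--
--     return "_".join(fp_str)
-- ===== SOURCE B (Python) =====
-- from itertools import groupby
--
--
-- def finger_print(number):
--     digits = sorted(int(ch) for ch in str(number))
--     return "_".join(str(d) + str(len(list(g))) for d, g in groupby(digits))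
-- ===== Notes on version B (the rewrite author's own statement) =====
-- stated objective: idiomatic
-- what changed: Replaced A's fixed count table over every possible digit plus the full-table scan with sorting the actual digits and emitting one token per run via itertools.groupby.
import Mathlib
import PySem

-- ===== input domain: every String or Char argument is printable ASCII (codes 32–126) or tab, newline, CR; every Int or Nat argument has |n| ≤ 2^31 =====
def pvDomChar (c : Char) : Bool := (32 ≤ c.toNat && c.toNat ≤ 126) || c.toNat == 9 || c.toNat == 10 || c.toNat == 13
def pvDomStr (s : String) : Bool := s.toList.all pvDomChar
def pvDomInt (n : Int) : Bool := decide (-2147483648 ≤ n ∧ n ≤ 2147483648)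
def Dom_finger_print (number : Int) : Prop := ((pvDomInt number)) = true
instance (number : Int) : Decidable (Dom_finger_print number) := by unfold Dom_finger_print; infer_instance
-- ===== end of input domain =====

-- B replaces A's fixed count table over every possible digit plus the full-table scan by sorting the digits and grouping runs (itertools.groupby): more idiomatic, not claimed faster.

-- ===== PORT A =====
-- the first loop: digit_profile[int(digit)] += 1; none = int() raised ValueError
def pvGoA : List Char → PySem.Dict Int Int → Option (PySem.Dict Int Int)
  | [], d => some d
  | c :: cs, d =>
    match PySem.Int.ofChars? [c] with
    | none => none
    | some v => pvGoA cs (d.modify v 0 (· + 1))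

def finger_print (number : Int) : String :=
  let digit_profile : PySem.Dict Int Int :=
    (PySem.List.pyRange 0 10 1).foldl (fun d digit => d.insert digit 0) PySem.Dict.empty
  match pvGoA (PySem.Int.toChars number) digit_profile with
  | none => ""  -- int(digit) raised ValueError in Python (number < 0); excluded by Pre_
  | some dp =>
    let fp_str := (PySem.List.pyRange 0 10 1).foldl
      (fun acc digit =>
        if 0 < dp.getD digit 0 then
          acc ++ [PySem.Int.toStr digit ++ PySem.Int.toStr (dp.getD digit 0)]
        else acc) ([] : List String)
    PySem.Str.join "_" fp_str

-- ===== PORT B =====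
-- sorted(int(ch) for ch in str(number)); none = int() raised ValueError
def pvCollect : List Char → Option (List Int)
  | [] => some []
  | c :: cs =>
    match PySem.Int.ofChars? [c] with
    | none => none
    | some v => (pvCollect cs).map (v :: ·)

-- itertools.groupby over the sorted digits: (key, length of the run)
def pvGroups : List Int → List (Int × Int)
  | [] => []
  | x :: xs =>
    (x, 1 + ((xs.takeWhile (· == x)).length : Int)) :: pvGroups (xs.dropWhile (· == x))
termination_by l => l.length
decreasing_by exact Nat.lt_succ_of_le (List.length_dropWhile_le _ _)

def finger_print_alt (number : Int) : String :=
  match pvCollect (PySem.Int.toChars number) with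
  | none => ""  -- int(ch) raised ValueError in Python (number < 0); excluded by Pre_
  | some vs =>
    let digits := PySem.List.sorted vs (fun x => x) false
    PySem.Str.join "_" ((pvGroups digits).map (fun g => PySem.Int.toStr g.1 ++ PySem.Int.toStr g.2))

-- ===== PRECONDITION & SPEC =====
-- Pre_ excludes negative inputs, on which both A and B raise ValueError (int of the minus sign).
def Pre_finger_print (number : Int) : Prop := 0 ≤ number
instance (number : Int) : Decidable (Pre_finger_print number) := by unfold Pre_finger_print; infer_instance
def pvWitness_finger_print : Int := (10)

def Spec_finger_print (number : Int) (out : String) : Prop := out = finger_print_alt number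
instance (number : Int) (out : String) : Decidable (Spec_finger_print number out) := by unfold Spec_finger_print; infer_instance

-- ===== CLAIM (what is proved, stated in full; the proofs are below) =====
def Claim_equal_finger_print : Prop := ∀ (number : Int), Dom_finger_print number → Pre_finger_print number → Spec_finger_print number (finger_print number)

-- ===== LEMMAS AND PROOFS =====

def pvDigits : List Char := ['0','1','2','3','4','5','6','7','8','9']

theorem pv_toDigitsCore_mem : ∀ (f n : ℕ) (l : List Char), (∀ c ∈ l, c ∈ pvDigits) →
    ∀ c ∈ Nat.toDigitsCore 10 f n l, c ∈ pvDigits := by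
  intro f
  induction f with
  | zero => intro n l hl c hc; exact hl c hc
  | succ f ih =>
    intro n l hl c hc
    have hd : (n % 10).digitChar ∈ pvDigits := by
      have h10 : n % 10 < 10 := Nat.mod_lt _ (by norm_num)
      set m := n % 10 with hm
      interval_cases m <;> decide
    rw [Nat.toDigitsCore] at hc
    split at hc
    · rcases List.mem_cons.mp hc with hc | hc
      · exact hc ▸ hd
      · exact hl c hc
    · refine ih (n / 10) _ ?_ c hc
      intro c' hc'
      rcases List.mem_cons.mp hc' with hc' | hc'
      · exact hc' ▸ hd
      · exact hl c' hc'

theorem pv_toChars_mem (n : Int) (h : 0 ≤ n) : ∀ c ∈ PySem.Int.toChars n, c ∈ pvDigits := by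
  intro c hc
  rw [PySem.Int.toChars, if_neg (not_lt.2 h)] at hc
  exact pv_toDigitsCore_mem _ _ [] (by intro c hc; cases hc) c hc

theorem pv_parse : ∀ c ∈ pvDigits, ∃ v : Int, PySem.Int.ofChars? [c] = some v ∧ 0 ≤ v ∧ v < 10 := by
  intro c hc
  fin_cases hc
  · exact ⟨0, by decide, by decide, by decide⟩
  · exact ⟨1, by decide, by decide, by decide⟩
  · exact ⟨2, by decide, by decide, by decide⟩
  · exact ⟨3, by decide, by decide, by decide⟩
  · exact ⟨4, by decide, by decide, by decide⟩
  · exact ⟨5, by decide, by decide, by decide⟩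
  · exact ⟨6, by decide, by decide, by decide⟩
  · exact ⟨7, by decide, by decide, by decide⟩
  · exact ⟨8, by decide, by decide, by decide⟩
  · exact ⟨9, by decide, by decide, by decide⟩

theorem pv_extract : ∀ (cs : List Char), (∀ c ∈ cs, c ∈ pvDigits) →
    ∃ ds : List Int, pvCollect cs = some ds ∧
      (∀ d0, pvGoA cs d0 = some (ds.foldl (fun d x => d.modify x 0 (fun y => y + 1)) d0)) ∧
      ∀ v ∈ ds, 0 ≤ v ∧ v < 10 := by
  intro cs
  induction cs with
  | nil =>
    intro _
    exact ⟨[], rfl, fun d0 => rfl, by intro v hv; cases hv⟩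
  | cons c cs ih =>
    intro h
    obtain ⟨v, hv, hv0, hv10⟩ := pv_parse c (h c (List.mem_cons_self ..))
    obtain ⟨ds, hcol, hgo, hbnd⟩ := ih (fun c' hc' => h c' (List.mem_cons_of_mem _ hc'))
    refine ⟨v :: ds, ?_, ?_, ?_⟩
    · simp [pvCollect, hv, hcol]
    · intro d0; simp [pvGoA, hv, hgo]
    · intro x hx
      rcases List.mem_cons.mp hx with hx | hx
      · subst hx; exact ⟨hv0, hv10⟩
      · exact hbnd x hx

theorem pv_init_zero : ∀ (l : List Int) (d : PySem.Dict Int Int), (∀ v, d.getD v 0 = 0) →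
    ∀ v, (l.foldl (fun d k => d.insert k (0 : Int)) d).getD v 0 = 0 := by
  intro l
  induction l with
  | nil => intro d hd v; exact hd v
  | cons k l ih =>
    intro d hd v
    refine ih _ ?_ v
    intro w
    by_cases hw : w = k
    · subst hw; exact PySem.Dict.getD_insert_self ..
    · rw [PySem.Dict.getD_insert_of_ne _ _ _ hw]; exact hd w

theorem pv_foldl_append_ite {α β : Type} (p : α → Prop) [DecidablePred p] (f : α → β) :
    ∀ (l : List α) (acc : List β),
    l.foldl (fun acc x => if p x then acc ++ [f x] else acc) acc
      = acc ++ (l.filter (fun x => decide (p x))).map f := by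
  intro l
  induction l with
  | nil => intro acc; simp
  | cons x l ih =>
    intro acc
    by_cases hx : p x <;> simp [hx, ih]

-- head run of a sorted list whose minimum candidate is d
theorem pv_run : ∀ (xs : List Int) (d : Int), xs.Pairwise (· ≤ ·) → (∀ y ∈ xs, d ≤ y) →
    ((xs.takeWhile (· == d)).length = xs.count d)
    ∧ (xs.dropWhile (· == d)).Pairwise (· ≤ ·)
    ∧ (∀ y ∈ xs.dropWhile (· == d), d + 1 ≤ y)
    ∧ (∀ v : Int, v ≠ d → (xs.dropWhile (· == d)).count v = xs.count v) := by
  intro xs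
  induction xs with
  | nil => intro d _ _; refine ⟨by simp, by simp, by simp, by simp⟩
  | cons y ys ih =>
    intro d hp hge
    have hpy : ys.Pairwise (· ≤ ·) := hp.of_cons
    have hyle : ∀ z ∈ ys, y ≤ z := fun z hz => List.rel_of_pairwise_cons hp hz
    by_cases hyd : y = d
    · subst hyd
      have hge' : ∀ z ∈ ys, y ≤ z := hyle
      obtain ⟨h1, h2, h3, h4⟩ := ih y hpy hge'
      refine ⟨?_, ?_, ?_, ?_⟩
      · simp [List.takeWhile_cons, h1, List.count_cons]
      · simpa [List.dropWhile_cons] using h2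
      · simpa [List.dropWhile_cons] using h3
      · intro v hv
        have hvy : ¬ (y = v) := fun h => hv h.symm
        have : (ys.dropWhile (· == y)).count v = ys.count v := h4 v hv
        simp [List.dropWhile_cons, this, List.count_cons, hvy]
    · have hdy : d < y := lt_of_le_of_ne (hge y (List.mem_cons_self ..)) (fun h => hyd h.symm)
      have hnot : ∀ z ∈ y :: ys, z ≠ d := by
        intro z hz
        rcases List.mem_cons.mp hz with hz | hz
        · omega
        · have := hyle z hz; omega
      refine ⟨?_, ?_, ?_, ?_⟩
      · have : (y :: ys).count d = 0 := by
          rw [List.count_eq_zero]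
          intro hmem
          exact hnot d hmem rfl
        simp [List.takeWhile_cons, hyd, this]
      · simpa [List.dropWhile_cons, hyd] using hp
      · intro z hz
        rw [List.dropWhile_cons_of_neg (by simp [hyd])] at hz
        rcases List.mem_cons.mp hz with hz | hz
        · omega
        · have := hyle z hz; omega
      · intro v _
        rw [List.dropWhile_cons_of_neg (by simp [hyd])]

theorem pv_main : ∀ (k : ℕ) (lo : Int) (L : List Int), lo + k = 10 → L.Pairwise (· ≤ ·) →
    (∀ x ∈ L, lo ≤ x ∧ x < 10) →
    pvGroups L = (PySem.List.pyRange lo 10 1).filterMap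
      (fun v => if 0 < L.count v then some (v, (L.count v : Int)) else none) := by
  intro k
  induction k with
  | zero =>
    intro lo L hk hp hb
    have hlo : lo = 10 := by omega
    subst hlo
    have hL : L = [] := by
      cases L with
      | nil => rfl
      | cons x xs => have := hb x (List.mem_cons_self ..); omega
    subst hL
    rw [PySem.List.pyRange_one_eq_nil (by omega)]
    simp [pvGroups]
  | succ k ih =>
    intro lo L hk hp hb
    have hlt : lo < 10 := by omega
    rw [PySem.List.pyRange_one_cons hlt]
    by_cases hc : 0 < L.count lo
    · -- lo is the minimum of L, which is nonempty
      cases L with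
      | nil => simp at hc
      | cons x xs =>
        have hxlo : x = lo := by
          have hmem : lo ∈ x :: xs := List.count_pos_iff.mp hc
          have hxle : ∀ z ∈ x :: xs, x ≤ z := by
            intro z hz
            rcases List.mem_cons.mp hz with hz | hz
            · omega
            · exact List.rel_of_pairwise_cons hp hz
          have h1 := hxle lo hmem
          have h2 := (hb x (List.mem_cons_self ..)).1
          omega
        subst hxlo
        obtain ⟨h1, h2, h3, h4⟩ := pv_run xs x hp.of_cons (fun z hz => List.rel_of_pairwise_cons hp hz)
        have hcnt : (x :: xs).count x = 1 + xs.count x := by simp [List.count_cons]; omega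
        have hrest := ih (x + 1) (xs.dropWhile (· == x)) (by omega) h2
          (by intro z hz
              refine ⟨h3 z hz, ?_⟩
              have hz' : z ∈ xs := (List.dropWhile_sublist _).subset hz
              exact (hb z (List.mem_cons_of_mem _ hz')).2)
        simp only [List.filterMap_cons, if_pos hc]
        rw [pvGroups]
        congr 1
        · rw [h1]
          simp [hcnt]
        · rw [hrest]
          refine List.filterMap_congr ?_
          intro v hv
          have hvlo : x + 1 ≤ v := (PySem.List.mem_pyRange_one.mp hv).1
          have hvne : v ≠ x := by omega
          rw [h4 v hvne]
          have hne' : ¬ x = v := fun h => hvne h.symm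
          have : (x :: xs).count v = xs.count v := by simp [List.count_cons, hne']
          rw [this]
    · -- lo does not occur in L
      simp only [List.filterMap_cons, if_neg hc]
      have hnot : lo ∉ L := by
        intro hmem
        exact hc (List.count_pos_iff.mpr hmem)
      refine Eq.trans ?_ rfl
      refine (ih (lo + 1) L (by omega) hp ?_)
      intro x hx
      have := hb x hx
      have hne : x ≠ lo := fun h => hnot (h ▸ hx)
      constructor <;> omega

theorem pv_bridge : ∀ (l : List Int) (c : Int → ℕ),
    (l.filterMap (fun v => if 0 < c v then some (v, (c v : Int)) else none)).map
        (fun g => PySem.Int.toStr g.1 ++ PySem.Int.toStr g.2)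
      = (l.filter (fun v => decide (0 < ((c v : ℕ) : Int)))).map
        (fun v => PySem.Int.toStr v ++ PySem.Int.toStr (c v : Int)) := by
  intro l c
  induction l with
  | nil => simp
  | cons x l ih =>
    by_cases hx : 0 < c x
    · have hx' : 0 < ((c x : ℕ) : Int) := by exact_mod_cast hx
      simp [List.filterMap_cons, List.filter_cons, hx, hx', ih]
    · have hx' : ¬ 0 < ((c x : ℕ) : Int) := by exact_mod_cast hx
      simp [List.filterMap_cons, List.filter_cons, hx, hx', ih]

-- ===== VERDICT (by name: the statement is the Claim_ definition above) =====
theorem finger_print_spec : Claim_equal_finger_print := by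
  intro n _ hpre
  unfold Spec_finger_print finger_print finger_print_alt
  obtain ⟨ds, hcol, hgo, hbnd⟩ := pv_extract (PySem.Int.toChars n) (pv_toChars_mem n hpre)
  simp only [hcol, hgo]
  have hdp : ∀ v, ((ds.foldl (fun d x => d.modify x 0 (fun y => y + 1))
      ((PySem.List.pyRange 0 10 1).foldl (fun d digit => d.insert digit 0) PySem.Dict.empty)).getD v 0)
      = (ds.count v : Int) := by
    intro v
    rw [PySem.Dict.getD_foldl_modify_add_one]
    rw [pv_init_zero _ _ (fun w => by simp [PySem.Dict.getD_empty]) v]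
    ring
  simp only [hdp]
  -- A side: the 0..9 scan is filter+map
  rw [pv_foldl_append_ite (fun v => 0 < ((ds.count v : ℕ) : Int))
      (fun v => PySem.Int.toStr v ++ PySem.Int.toStr (ds.count v : Int)) (PySem.List.pyRange 0 10 1) []]
  -- B side: groupby over the sorted digits = the same filter over 0..9
  have hperm : (PySem.List.sorted ds (fun x => x) false).Perm ds := PySem.List.sorted_perm ds _ _
  have hcnt : ∀ v, (PySem.List.sorted ds (fun x => x) false).count v = ds.count v :=
    fun v => hperm.count_eq v
  have hmain := pv_main 10 0 (PySem.List.sorted ds (fun x => x) false) (by norm_num)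
    (PySem.List.sorted_pairwise ds (fun x => x))
    (by intro x hx
        have : x ∈ ds := hperm.mem_iff.mp hx
        have := hbnd x this
        omega)
  simp only [hcnt] at hmain
  rw [hmain, pv_bridge]
  simp
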